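-- pv_equiv track=rewrite | github.com/yustero/csb | programs/three_state/hybrid_states.py | state_node_sum
-- ===== SOURCE A (Python) =====
-- def state_node_sum(adj,state):
--     n=len(adj)
--     sumd=[]
--     for i in range(0,n):
--         sum=0
--         for j in range(0,n):
--             sum+=state[j]*adj[j][i]
--         sumd.append(sum)
--     return(sumd)
-- ===== SOURCE B (Python) =====
-- def state_node_sum(adj, state):
--     # Row-major accumulation: maintain the whole output vector and fold each
--     # row's contribution into it, instead of computing each column dot product
--     # to completion with an inner scan over all rows.
--     n = len(adj)
--     sumd = [0] * n
--     for j in range(n):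
--         s = state[j]
--         row = adj[j]
--         sumd = [acc + s * row[i] for i, acc in enumerate(sumd)]
--     return sumd
-- ===== Notes on version B (the rewrite author's own statement) =====
-- stated objective: alternative
-- what changed: Column-major nested dot products (recompute each output from scratch) replaced by a row-major fold that maintains the whole output vector and adds each row's scaled contribution to it in one pass per row.
import Mathlib
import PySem

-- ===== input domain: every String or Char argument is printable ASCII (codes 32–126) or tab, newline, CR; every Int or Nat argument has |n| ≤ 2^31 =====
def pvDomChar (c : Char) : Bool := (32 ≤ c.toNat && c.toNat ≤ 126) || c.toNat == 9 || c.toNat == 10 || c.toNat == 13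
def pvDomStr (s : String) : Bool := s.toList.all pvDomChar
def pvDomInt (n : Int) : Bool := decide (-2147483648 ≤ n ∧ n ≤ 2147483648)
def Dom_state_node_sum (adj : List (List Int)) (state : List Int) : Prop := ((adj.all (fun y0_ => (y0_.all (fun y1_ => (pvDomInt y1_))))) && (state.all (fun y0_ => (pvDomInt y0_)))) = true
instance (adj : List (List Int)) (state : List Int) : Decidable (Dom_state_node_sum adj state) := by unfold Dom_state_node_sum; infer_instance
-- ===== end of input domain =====

-- B replaces A's column-major nested dot products with a row-major fold that
-- maintains the whole output vector (objective: alternative decomposition).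


-- ===== PORT A =====
def state_node_sum (adj : List (List Int)) (state : List Int) : List Int :=
  let n : Int := adj.length
  (PySem.List.pyRange 0 n 1).foldl (fun sumd i =>
    sumd ++ [(PySem.List.pyRange 0 n 1).foldl (fun sum j =>
      sum + PySem.List.pyGetD state j 0 * PySem.List.pyGetD (PySem.List.pyGetD adj j []) i 0) 0]) []

-- ===== PORT B =====
def state_node_sum_alt (adj : List (List Int)) (state : List Int) : List Int :=
  let n : Int := adj.length
  (PySem.List.pyRange 0 n 1).foldl (fun sumd j =>
    let s := PySem.List.pyGetD state j 0
    let row := PySem.List.pyGetD adj j []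
    (PySem.List.enumerate sumd 0).map (fun p => p.2 + s * PySem.List.pyGetD row p.1 0))
    (List.replicate adj.length 0)

-- ===== PRECONDITION & SPEC =====
-- Pre_ excludes exactly the inputs where Python A raises IndexError:
-- state shorter than len(adj), or some row of adj shorter than len(adj).
def Pre_state_node_sum (adj : List (List Int)) (state : List Int) : Prop :=
  adj.length ≤ state.length ∧ ∀ row ∈ adj, adj.length ≤ row.length
instance (adj : List (List Int)) (state : List Int) : Decidable (Pre_state_node_sum adj state) := by
  unfold Pre_state_node_sum; infer_instance
def pvWitness_state_node_sum : List (List Int) × List Int := ([[1, 2], [3, 4]], [5, -6])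

def Spec_state_node_sum (adj : List (List Int)) (state : List Int) (out : List Int) : Prop := out = state_node_sum_alt adj state
instance (adj : List (List Int)) (state : List Int) (out : List Int) : Decidable (Spec_state_node_sum adj state out) := by unfold Spec_state_node_sum; infer_instance

-- ===== CLAIM (what is proved, stated in full; the proofs are below) =====
def Claim_equal_state_node_sum : Prop := ∀ (adj : List (List Int)) (state : List Int), Dom_state_node_sum adj state → Pre_state_node_sum adj state → Spec_state_node_sum adj state (state_node_sum adj state)

-- ===== LEMMAS AND PROOFS =====

-- enumerating a replicate of zeros is the index range paired with 0
theorem pv_enumerate_replicate (n : Nat) (s : Int) :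
    PySem.List.enumerate (List.replicate n (0 : Int)) s
      = (PySem.List.pyRange s (s + n) 1).map (fun i => (i, (0 : Int))) := by
  induction n generalizing s with
  | zero => simp [PySem.List.pyRange_one_eq_nil]
  | succ n ih =>
      rw [List.replicate_succ, PySem.List.enumerate_cons, ih (s + 1),
        PySem.List.pyRange_one_cons (by omega : s < s + (n + 1 : Nat))]
      simp only [List.map_cons]
      have h : s + 1 + (n : Int) = s + ((n + 1 : Nat) : Int) := by push_cast; ring
      rw [h]

-- enumerating the value-map of an enumeration keeps the original indices
theorem pv_enumerate_enum_map {α β : Type} (F : Int → α → β) (xs : List α) (s : Int) :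
    PySem.List.enumerate ((PySem.List.enumerate xs s).map (fun p => F p.1 p.2)) s
      = (PySem.List.enumerate xs s).map (fun p => (p.1, F p.1 p.2)) := by
  induction xs generalizing s with
  | nil => simp [PySem.List.enumerate]
  | cons x xs ih => simp [PySem.List.enumerate_cons, ih]

-- B's outer fold: each position accumulates its column sum over the processed rows
theorem pv_alt_fold (f : Int → Int → Int) (L : List Int) (v : List Int) :
    L.foldl (fun sumd j =>
        (PySem.List.enumerate sumd 0).map (fun p => p.2 + f j p.1)) v
      = (PySem.List.enumerate v 0).map (fun p => p.2 + (L.map (fun j => f j p.1)).sum) := by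
  induction L generalizing v with
  | nil =>
      simp only [List.foldl_nil, List.map_nil, List.sum_nil, add_zero]
      have := PySem.List.map_snd_enumerate v 0
      calc v = (PySem.List.enumerate v 0).map (fun p => p.2) := this.symm
        _ = _ := rfl
  | cons j L ih =>
      rw [List.foldl_cons, ih, pv_enumerate_enum_map (fun i a => a + f j i) v 0]
      simp only [List.map_map, List.map_cons, List.sum_cons]
      apply List.map_congr_left
      intro p _
      simp only [Function.comp_apply]
      ring

-- ===== VERDICT (by name: the statement is the Claim_ definition above) =====
theorem state_node_sum_spec : Claim_equal_state_node_sum := by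
  intro adj state _ _
  unfold Spec_state_node_sum state_node_sum state_node_sum_alt
  simp only []
  rw [PySem.List.foldl_append_singleton_eq_map, pv_alt_fold
    (fun j i => PySem.List.pyGetD state j 0 * PySem.List.pyGetD (PySem.List.pyGetD adj j []) i 0),
    pv_enumerate_replicate adj.length 0]
  simp only [List.nil_append, List.map_map, zero_add]
  apply List.map_congr_left
  intro i _
  rw [PySem.List.foldl_add]
  simp
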